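-- pv_equiv track=rewrite | github.com/denizcetiner/rosalindpractice | SSEQ.py | find_spliced_motif
-- ===== SOURCE A (Python) =====
-- def find_spliced_motif(strand, motif):
--     spliced_positions = []
--
--     strand_position = 0
--     for motif_nucleotide in motif:
--         for strand_index in range(strand_position, len(strand)):
--             strand_nucleotide = strand[strand_index]
--             if motif_nucleotide == strand_nucleotide:
--                 spliced_positions.append(strand_index+1)
--                 strand_position = strand_index + 1
--                 break
--
--     return spliced_positions
-- ===== SOURCE B (Python) =====
-- def find_spliced_motif(strand, motif):
--     occ = {}
--     for i, ch in enumerate(strand):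
--         occ.setdefault(ch, []).append(i)
--     spliced_positions = []
--     pos = 0
--     for ch in motif:
--         lst = occ.get(ch, [])
--         lo, hi = 0, len(lst)
--         while lo < hi:
--             mid = (lo + hi) // 2
--             if lst[mid] < pos:
--                 lo = mid + 1
--             else:
--                 hi = mid
--         if lo < len(lst):
--             spliced_positions.append(lst[lo] + 1)
--             pos = lst[lo] + 1
--     return spliced_positions
-- ===== Notes on version B (the rewrite author's own statement) =====
-- stated objective: alternative
-- what changed: Replaces A's per-motif-character linear rescans of the strand by a one-pass occurrence index (dict char -> sorted position list) queried with a hand-written binary search for the first occurrence at or after the cursor.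
import Mathlib
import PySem

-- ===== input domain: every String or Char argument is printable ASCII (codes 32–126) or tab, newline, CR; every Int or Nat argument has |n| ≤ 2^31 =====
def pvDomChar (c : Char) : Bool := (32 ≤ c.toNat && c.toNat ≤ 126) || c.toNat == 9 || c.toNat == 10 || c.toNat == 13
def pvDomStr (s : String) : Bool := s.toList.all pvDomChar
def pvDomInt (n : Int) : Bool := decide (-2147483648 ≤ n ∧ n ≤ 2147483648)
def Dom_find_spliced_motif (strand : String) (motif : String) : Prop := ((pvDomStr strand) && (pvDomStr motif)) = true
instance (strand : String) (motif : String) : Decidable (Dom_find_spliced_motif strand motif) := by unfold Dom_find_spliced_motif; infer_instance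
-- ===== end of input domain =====

-- B replaces A's per-motif-character linear rescans of the strand by a one-pass occurrence
-- index (dict char -> sorted position list) queried with a hand-written binary search
-- (alternative algorithm of different traversal structure).

-- ===== PORT A =====
-- inner loop: 'for strand_index in range(strand_position, len(strand)): … break';
-- every index produced by range' is < s.length, so List.getD is exact for strand[strand_index].
def pvScanA (s : List Char) (c : Char) : List Nat → Option Nat
  | [] => none
  | i :: rest => if s.getD i ' ' = c then some i else pvScanA s c rest

def pvStepA (s : List Char) (st : List Int × Nat) (c : Char) : List Int × Nat :=
  match pvScanA s c (List.range' st.2 (s.length - st.2)) with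
  | some i => (st.1 ++ [(i : Int) + 1], i + 1)
  | none => st

def find_spliced_motif (strand : String) (motif : String) : List Int :=
  (motif.toList.foldl (pvStepA strand.toList) ([], 0)).1

-- ===== PORT B =====
-- 'for i, ch in enumerate(strand): occ.setdefault(ch, []).append(i)'
def pvOcc (s : List Char) : PySem.Dict Char (List Int) :=
  (PySem.List.enumerate s 0).foldl (fun d p => d.modify p.2 [] (· ++ [p.1])) PySem.Dict.empty

-- the hand-written binary-search while loop; lo, hi always stay within [0, len(lst)],
-- so Nat indices and List.getD are exact for lst[mid]
def pvBS (lst : List Int) (pos : Int) (lo hi : Nat) : Nat :=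
  if lo < hi then
    if lst.getD ((lo + hi) / 2) 0 < pos then pvBS lst pos ((lo + hi) / 2 + 1) hi
    else pvBS lst pos lo ((lo + hi) / 2)
  else lo
termination_by hi - lo
decreasing_by all_goals omega

def pvStepB (occ : PySem.Dict Char (List Int)) (st : List Int × Int) (ch : Char) : List Int × Int :=
  let lst := occ.getD ch []
  let lo := pvBS lst st.2 0 lst.length
  if lo < lst.length then (st.1 ++ [lst.getD lo 0 + 1], lst.getD lo 0 + 1) else st

def find_spliced_motif_alt (strand : String) (motif : String) : List Int :=
  (motif.toList.foldl (pvStepB (pvOcc strand.toList)) ([], 0)).1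

-- ===== PRECONDITION & SPEC =====
def Spec_find_spliced_motif (strand : String) (motif : String) (out : List Int) : Prop := out = find_spliced_motif_alt strand motif
instance (strand : String) (motif : String) (out : List Int) : Decidable (Spec_find_spliced_motif strand motif out) := by unfold Spec_find_spliced_motif; infer_instance

-- ===== CLAIM (what is proved, stated in full; the proofs are below) =====
def Claim_equal_find_spliced_motif : Prop := ∀ (strand : String) (motif : String), Dom_find_spliced_motif strand motif → Spec_find_spliced_motif strand motif (find_spliced_motif strand motif)

-- ===== LEMMAS AND PROOFS =====

theorem pvScanA_none (s : List Char) (c : Char) (idxs : List Nat)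
    (h : ∀ i ∈ idxs, s.getD i ' ' ≠ c) : pvScanA s c idxs = none := by
  induction idxs with
  | nil => rfl
  | cons i rest ih =>
    simp only [pvScanA]
    rw [if_neg (h i (by simp))]
    exact ih fun j hj => h j (by simp [hj])

theorem pvScanA_first (s : List Char) (c : Char) :
    ∀ (k pos n : Nat), k < n → s.getD (pos + k) ' ' = c →
      (∀ j, j < k → s.getD (pos + j) ' ' ≠ c) →
      pvScanA s c (List.range' pos n) = some (pos + k) := by
  intro k
  induction k with
  | zero =>
    intro pos n hn hc _
    obtain ⟨m, rfl⟩ : ∃ m, n = m + 1 := ⟨n - 1, by omega⟩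
    rw [List.range'_succ]
    simp only [pvScanA]
    rw [if_pos (by simpa using hc)]
    simp
  | succ k ih =>
    intro pos n hn hc hmin
    obtain ⟨m, rfl⟩ : ∃ m, n = m + 1 := ⟨n - 1, by omega⟩
    rw [List.range'_succ]
    simp only [pvScanA]
    rw [if_neg (by simpa using hmin 0 (by omega))]
    have := ih (pos + 1) m (by omega) (by simpa [Nat.add_assoc, Nat.add_comm 1 k] using hc)
      (fun j hj => by simpa [Nat.add_assoc, Nat.add_comm 1 j] using hmin (j + 1) (by omega))
    simpa [Nat.add_assoc, Nat.add_comm 1 k] using this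

-- membership in list(enumerate(s, k))
theorem pv_enum_mem (s : List Char) : ∀ (k x : Int) (c : Char),
    (x, c) ∈ PySem.List.enumerate s k ↔
      ∃ n : Nat, n < s.length ∧ x = k + n ∧ s.getD n ' ' = c := by
  induction s with
  | nil => intro k x c; simp [PySem.List.enumerate_nil]
  | cons a t ih =>
    intro k x c
    rw [PySem.List.enumerate_cons, List.mem_cons]
    constructor
    · rintro (h | h)
      · obtain ⟨hx, hc⟩ := Prod.mk.injEq .. ▸ h
        exact ⟨0, by simp, by simp [hx], by simp [hc]⟩
      · obtain ⟨n, hn, hx, hc⟩ := (ih (k + 1) x c).mp h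
        exact ⟨n + 1, by simpa using hn, by push_cast at hx ⊢; omega, by simpa using hc⟩
    · rintro ⟨n, hn, hx, hc⟩
      cases n with
      | zero =>
        left
        simp only [List.getD_cons_zero] at hc
        simp [hx, hc]
      | succ m =>
        right
        refine (ih (k + 1) x c).mpr ⟨m, by simpa using hn, by push_cast at hx ⊢; omega, by simpa using hc⟩

-- first components of enumerate are strictly increasing
theorem pv_enum_fst_lt (s : List Char) : ∀ (k : Int),
    (PySem.List.enumerate s k).Pairwise (fun p q => p.1 < q.1) := by
  induction s with
  | nil => intro k; simp [PySem.List.enumerate_nil]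
  | cons a t ih =>
    intro k
    rw [PySem.List.enumerate_cons]
    refine List.Pairwise.cons ?_ (ih (k + 1))
    intro q hq
    obtain ⟨n, _, hx, _⟩ := (pv_enum_mem t (k + 1) q.1 q.2).mp (by simpa using hq)
    simp only [hx]
    omega

-- the occurrence list stored for ch
theorem pv_occ_getD (s : List Char) (ch : Char) :
    (pvOcc s).getD ch [] =
      ((PySem.List.enumerate s 0).filter (fun p => p.2 == ch)).map (·.1) := by
  unfold pvOcc
  have h1 : ((PySem.List.enumerate s 0).map Prod.swap).foldl
        (fun (d : PySem.Dict Char (List Int)) p => d.modify p.1 [] (· ++ [p.2])) PySem.Dict.empty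
      = (PySem.List.enumerate s 0).foldl
        (fun (d : PySem.Dict Char (List Int)) p => d.modify p.2 [] (· ++ [p.1])) PySem.Dict.empty :=
    List.foldl_map
  rw [← h1, PySem.Dict.getD_foldl_modify_append]
  simp [List.filter_map, List.map_map, Function.comp_def]

theorem pv_occ_mem (s : List Char) (ch : Char) (x : Int) :
    x ∈ (pvOcc s).getD ch [] ↔
      ∃ n : Nat, n < s.length ∧ x = (n : Int) ∧ s.getD n ' ' = ch := by
  rw [pv_occ_getD]
  simp only [List.mem_map, List.mem_filter]
  constructor
  · rintro ⟨p, ⟨hp, hc⟩, hx⟩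
    obtain ⟨n, hn, h1, h2⟩ := (pv_enum_mem s 0 p.1 p.2).mp (by simpa using hp)
    exact ⟨n, hn, by omega, by rw [h2]; exact (beq_iff_eq.mp hc)⟩
  · rintro ⟨n, hn, hx, hc⟩
    exact ⟨(x, ch), ⟨(pv_enum_mem s 0 x ch).mpr ⟨n, hn, by omega, hc⟩, by simp⟩, rfl⟩

theorem pv_occ_sorted (s : List Char) (ch : Char) :
    ((pvOcc s).getD ch []).Pairwise (· < ·) := by
  rw [pv_occ_getD]
  exact ((pv_enum_fst_lt s 0).filter _).map _ (fun _ _ h => h)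

theorem pv_getD_mono (lst : List Int) (h : lst.Pairwise (· < ·)) (i j : Nat)
    (hij : i ≤ j) (hj : j < lst.length) : lst.getD i 0 ≤ lst.getD j 0 := by
  rcases Nat.lt_or_ge i j with hlt | hge
  · rw [List.getD_eq_getElem _ _ (by omega), List.getD_eq_getElem _ _ hj]
    exact le_of_lt (List.pairwise_iff_getElem.mp h i j (by omega) hj hlt)
  · have : i = j := by omega
    rw [this]

-- the binary search returns the split point between elements < pos and elements ≥ pos
theorem pv_pvBS_spec (lst : List Int) (pos : Int) (hso : lst.Pairwise (· < ·)) :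
    ∀ (n lo hi : Nat), hi - lo ≤ n → lo ≤ hi → hi ≤ lst.length →
      (∀ j, j < lo → lst.getD j 0 < pos) →
      (∀ j, hi ≤ j → j < lst.length → pos ≤ lst.getD j 0) →
      pvBS lst pos lo hi ≤ lst.length ∧
      (∀ j, j < pvBS lst pos lo hi → lst.getD j 0 < pos) ∧
      (∀ j, pvBS lst pos lo hi ≤ j → j < lst.length → pos ≤ lst.getD j 0) := by
  intro n
  induction n with
  | zero =>
    intro lo hi h0 hle hlen hlow hhigh
    rw [pvBS, if_neg (by omega : ¬ lo < hi)]
    exact ⟨by omega, hlow, fun j hj hjl => hhigh j (by omega) hjl⟩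
  | succ n ih =>
    intro lo hi h0 hle hlen hlow hhigh
    by_cases hlt : lo < hi
    · rw [pvBS, if_pos hlt]
      by_cases hc : lst.getD ((lo + hi) / 2) 0 < pos
      · rw [if_pos hc]
        refine ih ((lo + hi) / 2 + 1) hi (by omega) (by omega) hlen ?_ hhigh
        intro j hj
        exact lt_of_le_of_lt (pv_getD_mono lst hso j ((lo + hi) / 2) (by omega) (by omega)) hc
      · rw [if_neg hc]
        refine ih lo ((lo + hi) / 2) (by omega) (by omega) (by omega) hlow ?_
        intro j hjm hjl
        exact le_trans (not_lt.mp hc) (pv_getD_mono lst hso ((lo + hi) / 2) j hjm hjl)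
    · rw [pvBS, if_neg hlt]
      exact ⟨by omega, hlow, fun j hj hjl => hhigh j (by omega) hjl⟩

theorem pv_pvBS_full (lst : List Int) (pos : Int) (hso : lst.Pairwise (· < ·)) :
    pvBS lst pos 0 lst.length ≤ lst.length ∧
    (∀ j, j < pvBS lst pos 0 lst.length → lst.getD j 0 < pos) ∧
    (∀ j, pvBS lst pos 0 lst.length ≤ j → j < lst.length → pos ≤ lst.getD j 0) :=
  pv_pvBS_spec lst pos hso lst.length 0 lst.length (by omega) (by omega) (le_refl _)
    (fun j hj => absurd hj (by omega)) (fun j hj hjl => absurd hjl (by omega))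

-- main loop invariant: A's state (acc, pos : Nat) mirrors B's state (acc, ↑pos)
theorem pv_main (s : List Char) (m : List Char) :
    ∀ (acc : List Int) (pos : Nat), pos ≤ s.length →
      (m.foldl (pvStepA s) (acc, pos)).1 =
        (m.foldl (pvStepB (pvOcc s)) (acc, (pos : Int))).1 := by
  induction m with
  | nil => intro acc pos _; rfl
  | cons c rest ih =>
    intro acc pos hpos
    simp only [List.foldl_cons]
    set lst := (pvOcc s).getD c [] with hlst
    have hso := pv_occ_sorted s c
    obtain ⟨hr_len, hr_lo, hr_hi⟩ := pv_pvBS_full lst (pos : Int) hso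
    set r := pvBS lst (pos : Int) 0 lst.length with hr
    by_cases hex : ∃ j : Nat, pos ≤ j ∧ j < s.length ∧ s.getD j ' ' = c
    · -- a next occurrence exists; both sides find the same minimal one
      have hP : pos ≤ Nat.find hex ∧ Nat.find hex < s.length ∧ s.getD (Nat.find hex) ' ' = c :=
        Nat.find_spec hex
      set i0 := Nat.find hex with hi0
      have hmin : ∀ j, j < i0 → ¬ (pos ≤ j ∧ j < s.length ∧ s.getD j ' ' = c) :=
        fun j hj => Nat.find_min hex hj
      -- A's inner scan returns i0
      have hscan : pvScanA s c (List.range' pos (s.length - pos)) = some i0 := by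
        have := pvScanA_first s c (i0 - pos) pos (s.length - pos) (by omega)
          (by rw [show pos + (i0 - pos) = i0 by omega]; exact hP.2.2)
          (fun j hj hcj => hmin (pos + j) (by omega) ⟨by omega, by omega, hcj⟩)
        rwa [show pos + (i0 - pos) = i0 by omega] at this
      have hA : pvStepA s (acc, pos) c = (acc ++ [(i0 : Int) + 1], i0 + 1) := by
        simp only [pvStepA, hscan]
      -- i0 appears in lst at some index k, and r = k
      have hi0mem : (i0 : Int) ∈ lst :=
        (pv_occ_mem s c (i0 : Int)).mpr ⟨i0, hP.2.1, rfl, hP.2.2⟩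
      obtain ⟨k, hk, hke⟩ := List.getElem_of_mem hi0mem
      have hkD : lst.getD k 0 = (i0 : Int) := by rw [List.getD_eq_getElem _ _ hk, hke]
      have hrk : r = k := by
        rcases Nat.lt_trichotomy r k with h1 | h2 | h3
        · exfalso
          have hrlen : r < lst.length := by omega
          have hge : (pos : Int) ≤ lst.getD r 0 := hr_hi r (le_refl _) hrlen
          have hlt : lst.getD r 0 < (i0 : Int) := by
            rw [List.getD_eq_getElem _ _ hrlen, ← hke]
            exact List.pairwise_iff_getElem.mp hso r k hrlen hk h1
          obtain ⟨n, hn, hxn, hcn⟩ :=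
            (pv_occ_mem s c (lst.getD r 0)).mp (by
              rw [List.getD_eq_getElem _ _ hrlen]; exact List.getElem_mem _)
          exact hmin n (by omega) ⟨by omega, hn, hcn⟩
        · exact h2
        · exfalso
          have := hr_lo k h3
          rw [hkD] at this
          omega
      have hrlt : r < lst.length := by omega
      have hB : pvStepB (pvOcc s) (acc, (pos : Int)) c =
          (acc ++ [(i0 : Int) + 1], (i0 : Int) + 1) := by
        simp only [pvStepB, ← hlst, ← hr, hrk, hkD, if_pos hk]
      rw [hA, hB]
      have := ih (acc ++ [(i0 : Int) + 1]) (i0 + 1) (by omega)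
      rw [this]
      norm_num
    · -- no occurrence of c at or after pos: both sides skip this motif character
      have hscan : pvScanA s c (List.range' pos (s.length - pos)) = none := by
        apply pvScanA_none
        intro i hi hci
        rw [List.mem_range'_1] at hi
        exact hex ⟨i, hi.1, by omega, hci⟩
      have hA : pvStepA s (acc, pos) c = (acc, pos) := by
        simp only [pvStepA, hscan]
      have hB : pvStepB (pvOcc s) (acc, (pos : Int)) c = (acc, (pos : Int)) := by
        have hnr : ¬ r < lst.length := by
          intro hrlen
          obtain ⟨n, hn, hxn, hcn⟩ :=
            (pv_occ_mem s c (lst.getD r 0)).mp (by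
              rw [List.getD_eq_getElem _ _ hrlen]; exact List.getElem_mem _)
          have hge : (pos : Int) ≤ lst.getD r 0 := hr_hi r (le_refl _) hrlen
          exact hex ⟨n, by omega, hn, hcn⟩
        simp only [pvStepB, ← hlst, ← hr, if_neg hnr]
      rw [hA, hB]
      exact ih acc pos hpos

-- ===== VERDICT (by name: the statement is the Claim_ definition above) =====
theorem find_spliced_motif_spec : Claim_equal_find_spliced_motif := by
  intro strand motif _
  unfold Spec_find_spliced_motif find_spliced_motif find_spliced_motif_alt
  simpa using pv_main strand.toList motif.toList [] 0 (by omega)
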